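-- pv_equiv track=rewrite | github.com/lemonsis/Oracle_Benchmark | platforms/encryption/hard/sequential_feedback_cipher_final.py | blackbox
-- ===== SOURCE A (Python) =====
-- def blackbox(plaintext):
--     # Mapping: A=0, B=1, ..., Z=25, a=26, ..., z=51
--     def char_to_val(c):
--         if 'A' <= c <= 'Z':
--             return ord(c) - ord('A')
--         elif 'a' <= c <= 'z':
--             return ord(c) - ord('a') + 26
--         else:
--             return None  # For non-letter, should not happen
--
--     def val_to_char(v):
--         if 0 <= v <= 25:
--             return chr(ord('A') + v)
--         elif 26 <= v <= 51:
--             return chr(ord('a') + (v - 26))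
--         else:
--             return ''  # Should not happen
--
--     ciphertext = ''
--     prev_enc_val = char_to_val('b')  # initial hidden letter is 'b'
--     for c in plaintext:
--         if c == ' ':
--             ciphertext += ' '
--             continue
--         val = char_to_val(c)
--         if val is None:
--             continue  # skip non-letters, though per spec, input only contains letters
--         enc_val = (val + prev_enc_val) % 52
--         enc_char = val_to_char(enc_val)
--         ciphertext += enc_char
--         prev_enc_val = enc_val
--     return ciphertext
-- ===== SOURCE B (Python) =====
-- def blackbox(plaintext):
--     # Two-pass prefix-sum formulation: filter letter values, running-sum mod 52
--     # (seed 27 = 'b'), map to chars, then reassemble around echoed spaces.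
--     def letter_val(c):
--         if 'A' <= c <= 'Z':
--             return ord(c) - 65
--         if 'a' <= c <= 'z':
--             return ord(c) - 71  # 26..51
--         return None
--
--     vals = [v for v in map(letter_val, plaintext) if v is not None]
--     encs = []
--     s = 27
--     for v in vals:
--         s = (s + v) % 52
--         encs.append(s)
--     letters = [chr(e + 65) if e < 26 else chr(e + 71) for e in encs]
--     out = []
--     it = iter(letters)
--     for c in plaintext:
--         if c == ' ':
--             out.append(' ')
--         elif letter_val(c) is not None:
--             out.append(next(it))
--     return ''.join(out)
-- ===== Notes on version B (the rewrite author's own statement) =====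
-- stated objective: alternative
-- what changed: Replaces A's single stateful loop (feedback value threaded per character while building the string) by a pipeline: extract letter values, compute the mod-52 running sums as a prefix-sum list, map them to output letters, and a separate assembly pass that echoes spaces and splices the letters back in.
import Mathlib
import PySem

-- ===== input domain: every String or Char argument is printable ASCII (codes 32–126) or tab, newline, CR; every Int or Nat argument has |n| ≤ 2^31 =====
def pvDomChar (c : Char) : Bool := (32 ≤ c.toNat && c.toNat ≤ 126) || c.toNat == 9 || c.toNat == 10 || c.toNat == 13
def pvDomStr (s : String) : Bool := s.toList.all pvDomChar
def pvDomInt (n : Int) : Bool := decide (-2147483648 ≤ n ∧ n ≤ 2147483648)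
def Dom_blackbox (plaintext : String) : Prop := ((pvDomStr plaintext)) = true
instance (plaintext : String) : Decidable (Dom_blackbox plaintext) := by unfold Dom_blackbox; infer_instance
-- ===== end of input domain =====

-- B restates A's feedback loop as a prefix-sum pipeline (extract letter values,
-- running sums mod 52, map to chars, reassemble around spaces); same cost, different decomposition.

-- ===== PORT A =====
-- char_to_val: A=0..Z=25, a=26..z=51, else None
def pvCharToVal (c : Char) : Option Int :=
  if 'A' ≤ c ∧ c ≤ 'Z' then some ((c.toNat : Int) - 65)
  else if 'a' ≤ c ∧ c ≤ 'z' then some ((c.toNat : Int) - 97 + 26)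
  else none

-- val_to_char (returns '' outside 0..51, hence a List Char)
def pvValToChar (v : Int) : List Char :=
  if 0 ≤ v ∧ v ≤ 25 then [Char.ofNat (65 + v).toNat]
  else if 26 ≤ v ∧ v ≤ 51 then [Char.ofNat (97 + (v - 26)).toNat]
  else []

-- A's loop over the characters, threading prev_enc_val
def pvALoop : List Char → Int → List Char
  | [], _ => []
  | c :: rest, prev =>
    if c = ' ' then ' ' :: pvALoop rest prev
    else
      match pvCharToVal c with
      | none => pvALoop rest prev
      | some v =>
        let enc := PySem.Int.mod (v + prev) 52
        pvValToChar enc ++ pvALoop rest enc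

def blackbox (plaintext : String) : String :=
  -- prev_enc_val = char_to_val('b') = 27
  String.ofList (pvALoop plaintext.toList 27)

-- ===== PORT B =====
def pvLetterVal (c : Char) : Option Int :=
  if 'A' ≤ c ∧ c ≤ 'Z' then some ((c.toNat : Int) - 65)
  else if 'a' ≤ c ∧ c ≤ 'z' then some ((c.toNat : Int) - 71)
  else none

-- running sums mod 52 (encs list)
def pvPrefixEncs : List Int → Int → List Int
  | [], _ => []
  | v :: vs, s =>
    let s' := PySem.Int.mod (s + v) 52
    s' :: pvPrefixEncs vs s'

def pvEncChar (e : Int) : Char :=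
  if e < 26 then Char.ofNat (e + 65).toNat else Char.ofNat (e + 71).toNat

-- assembly pass: echo spaces, splice the next letter for each letter position
def pvAssemble : List Char → List Char → List Char
  | [], _ => []
  | c :: rest, ls =>
    if c = ' ' then ' ' :: pvAssemble rest ls
    else if (pvLetterVal c).isSome then
      match ls with
      | l :: ls' => l :: pvAssemble rest ls'
      | [] => pvAssemble rest []
    else pvAssemble rest ls

def blackbox_alt (plaintext : String) : String :=
  let cs := plaintext.toList
  let vals := cs.filterMap pvLetterVal
  let letters := (pvPrefixEncs vals 27).map pvEncChar
  String.ofList (pvAssemble cs letters)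

-- ===== PRECONDITION & SPEC =====
def Spec_blackbox (plaintext : String) (out : String) : Prop := out = blackbox_alt plaintext
instance (plaintext : String) (out : String) : Decidable (Spec_blackbox plaintext out) := by unfold Spec_blackbox; infer_instance

-- ===== CLAIM (what is proved, stated in full; the proofs are below) =====
def Claim_equal_blackbox : Prop := ∀ (plaintext : String), Dom_blackbox plaintext → Spec_blackbox plaintext (blackbox plaintext)

-- ===== LEMMAS AND PROOFS =====

theorem letterVal_eq_charToVal (c : Char) : pvLetterVal c = pvCharToVal c := by
  unfold pvLetterVal pvCharToVal
  split_ifs with h1 h2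
  · rfl
  · simp
    omega
  · rfl

theorem letterVal_space : pvLetterVal ' ' = none := by decide

theorem valToChar_eq_encChar (e : Int) (h0 : 0 ≤ e) (h1 : e < 52) :
    pvValToChar e = [pvEncChar e] := by
  unfold pvValToChar pvEncChar
  split_ifs with a b c
  · rw [Int.add_comm]
  · omega
  · omega
  · have h : 97 + (e - 26) = e + 71 := by omega
    rw [h]
  · omega

theorem loop_eq_pipeline (cs : List Char) (prev : Int) :
    pvALoop cs prev =
      pvAssemble cs ((pvPrefixEncs (cs.filterMap pvLetterVal) prev).map pvEncChar) := by
  induction cs generalizing prev with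
  | nil => rfl
  | cons c rest ih =>
    by_cases hsp : c = ' '
    · subst hsp
      simp [pvALoop, pvAssemble, letterVal_space, ih]
    · rw [pvALoop]
      rw [if_neg hsp]
      rw [← letterVal_eq_charToVal]
      cases hv : pvLetterVal c with
      | none =>
        simp [pvAssemble, hsp, hv, ih]
      | some v =>
        have henc0 : 0 ≤ PySem.Int.mod (v + prev) 52 := PySem.Int.mod_nonneg _ (by norm_num)
        have henc1 : PySem.Int.mod (v + prev) 52 < 52 := PySem.Int.mod_lt _ (by norm_num)
        simp only [List.filterMap_cons, pvPrefixEncs, List.map_cons, pvAssemble,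
          if_neg hsp, hv, Option.isSome_some, if_pos]
        rw [valToChar_eq_encChar _ henc0 henc1, ih]
        have hc : v + prev = prev + v := by ring
        simp [hc]

-- ===== VERDICT (by name: the statement is the Claim_ definition above) =====
theorem blackbox_spec : Claim_equal_blackbox := by
  intro p _
  unfold Spec_blackbox blackbox blackbox_alt
  simp [loop_eq_pipeline]
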